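-- pv_equiv track=rewrite | github.com/HyperPh/PCIAuto | pyauto/fan/html_analysis.py | correct_caption
-- ===== SOURCE A (Python) =====
-- def correct_caption(captions,search_keyword:list):
--     if captions and search_keyword:
--         correct=[]
--         k = 0  # todo 第几个关键词
--         s1 = ""
--         for i in range(0,len(captions)):
--             if captions[i].startswith('\n        ') and i>0:
--                 correct.append(s1)
--                 # k=0这样做有问题
--                 s1=captions[i].replace('\n        ','')
--             elif i==0:
--                 s1=captions[i].replace('\n        ','')
--             else:
--                 s1+=search_keyword[k]+captions[i]
--                 # k+=1这样做有问题，有些中间没有关键词却也是断开的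
--         correct.append(s1)
--
--         return correct
--     elif captions:
--         correct = []
--         s1 = ""
--         for i in range(0, len(captions)):
--             if captions[i].startswith('\n        ') and i > 0:
--                 correct.append(s1)
--                 s1 = captions[i].replace('\n        ', '')
--             elif i == 0:
--                 s1 = captions[i].replace('\n        ', '')
--             else:
--                 s1 += captions[i]
--         correct.append(s1)
--
--         return correct
--     else:  # 标题列为空
--         return captions
-- ===== SOURCE B (Python) =====
-- def correct_caption(captions, search_keyword: list):
--     if not captions:
--         return captions
--     joiner = search_keyword[0] if search_keyword else ''
--     prefix = '\n        '
--     groups = []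
--     cur = [captions[0].replace(prefix, '')]
--     for c in captions[1:]:
--         if c.startswith(prefix):
--             groups.append(cur)
--             cur = [c.replace(prefix, '')]
--         else:
--             cur.append(c)
--     groups.append(cur)
--     return [joiner.join(g) for g in groups]
-- ===== Notes on version B (the rewrite author's own statement) =====
-- stated objective: simpler
-- what changed: B replaces A's two near-duplicate index-driven accumulation loops with a single pass that groups the fragments into lists (new group at each '\n '-prefixed element) and then joins each group with a unified joiner (search_keyword[0] or ''), eliminating the duplicated branch and the index bookkeeping.
import Mathlib
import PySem

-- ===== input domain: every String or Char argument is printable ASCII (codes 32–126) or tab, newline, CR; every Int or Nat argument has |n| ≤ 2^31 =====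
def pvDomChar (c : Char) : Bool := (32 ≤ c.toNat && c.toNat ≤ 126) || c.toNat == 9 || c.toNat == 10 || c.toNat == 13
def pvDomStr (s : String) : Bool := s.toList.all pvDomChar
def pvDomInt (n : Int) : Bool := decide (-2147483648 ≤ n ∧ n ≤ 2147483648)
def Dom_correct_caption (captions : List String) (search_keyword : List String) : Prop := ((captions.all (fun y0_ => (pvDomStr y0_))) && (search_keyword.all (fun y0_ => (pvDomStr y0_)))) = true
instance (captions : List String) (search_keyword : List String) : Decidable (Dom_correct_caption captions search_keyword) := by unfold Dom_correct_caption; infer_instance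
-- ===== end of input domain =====

-- B groups the caption fragments in one pass and joins each group, replacing A's
-- two near-duplicate index-driven string-accumulation loops; objective: simpler.

-- ===== PORT A =====
def correct_caption (captions : List String) (search_keyword : List String) : List String :=
  if captions ≠ [] ∧ search_keyword ≠ [] then
    let r := (PySem.List.pyRange 0 (PySem.List.len captions) 1).foldl
      (fun (st : List String × String) i =>
        if PySem.Str.startswith (PySem.List.pyGetD captions i "") "\n        " && decide (0 < i) then
          (st.1 ++ [st.2], PySem.Str.replace (PySem.List.pyGetD captions i "") "\n        " "")
        else if i == 0 then
          (st.1, PySem.Str.replace (PySem.List.pyGetD captions i "") "\n        " "")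
        else
          (st.1, st.2 ++ PySem.List.pyGetD search_keyword 0 "" ++ PySem.List.pyGetD captions i ""))
      ([], "")
    r.1 ++ [r.2]
  else if captions ≠ [] then
    let r := (PySem.List.pyRange 0 (PySem.List.len captions) 1).foldl
      (fun (st : List String × String) i =>
        if PySem.Str.startswith (PySem.List.pyGetD captions i "") "\n        " && decide (0 < i) then
          (st.1 ++ [st.2], PySem.Str.replace (PySem.List.pyGetD captions i "") "\n        " "")
        else if i == 0 then
          (st.1, PySem.Str.replace (PySem.List.pyGetD captions i "") "\n        " "")
        else
          (st.1, st.2 ++ PySem.List.pyGetD captions i ""))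
      ([], "")
    r.1 ++ [r.2]
  else captions

-- ===== PORT B =====
def correct_caption_alt (captions : List String) (search_keyword : List String) : List String :=
  match captions with
  | [] => captions
  | c0 :: rest =>
    let joiner := if search_keyword ≠ [] then PySem.List.pyGetD search_keyword 0 "" else ""
    let st := rest.foldl
      (fun (st : List (List String) × List String) c =>
        if PySem.Str.startswith c "\n        " then
          (st.1 ++ [st.2], [PySem.Str.replace c "\n        " ""])
        else
          (st.1, st.2 ++ [c]))
      ([], [PySem.Str.replace c0 "\n        " ""])
    (st.1 ++ [st.2]).map (fun g => PySem.Str.join joiner g)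

-- ===== PRECONDITION & SPEC =====
def Spec_correct_caption (captions : List String) (search_keyword : List String) (out : List String) : Prop := out = correct_caption_alt captions search_keyword
instance (captions : List String) (search_keyword : List String) (out : List String) : Decidable (Spec_correct_caption captions search_keyword out) := by unfold Spec_correct_caption; infer_instance

-- ===== CLAIM (what is proved, stated in full; the proofs are below) =====
def Claim_equal_correct_caption : Prop := ∀ (captions : List String) (search_keyword : List String), Dom_correct_caption captions search_keyword → Spec_correct_caption captions search_keyword (correct_caption captions search_keyword)

-- ===== LEMMAS AND PROOFS =====

-- A's accumulation step for the tail of the list (joiner j), and B's grouping step.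
def pvStepA (j : String) (st : List String × String) (c : String) : List String × String :=
  if PySem.Str.startswith c "\n        " then
    (st.1 ++ [st.2], PySem.Str.replace c "\n        " "")
  else
    (st.1, st.2 ++ j ++ c)

def pvStepB (st : List (List String) × List String) (c : String) : List (List String) × List String :=
  if PySem.Str.startswith c "\n        " then
    (st.1 ++ [st.2], [PySem.Str.replace c "\n        " ""])
  else
    (st.1, st.2 ++ [c])

theorem pv_join_one (j x : String) : PySem.Str.join j [x] = x := by
  rw [← String.toList_inj]
  simp [PySem.Str.toList_join, PySem.Chars.join_singleton]

theorem pv_join_append (j : String) (g : List String) (c : String) (h : g ≠ []) :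
    PySem.Str.join j (g ++ [c]) = PySem.Str.join j g ++ j ++ c := by
  rw [← String.toList_inj]
  simp only [String.toList_append, PySem.Str.toList_join, List.map_append, List.map]
  obtain ⟨x, t, rfl⟩ := List.exists_cons_of_ne_nil h
  induction t generalizing x with
  | nil => simp [PySem.Chars.join_cons_cons, PySem.Chars.join_singleton]
  | cons y t ih =>
    simp only [List.map_cons, List.cons_append, PySem.Chars.join_cons_cons] at *
    simp [ih y, List.append_assoc]

-- Core invariant: A's string accumulation over the tail is B's grouping mapped through join.
theorem pv_core (j : String) : ∀ (rest : List String) (done : List (List String)) (cur : List String),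
    cur ≠ [] →
    (rest.foldl (pvStepA j) (done.map (PySem.Str.join j), PySem.Str.join j cur)).1
      ++ [(rest.foldl (pvStepA j) (done.map (PySem.Str.join j), PySem.Str.join j cur)).2]
    = ((rest.foldl pvStepB (done, cur)).1 ++ [(rest.foldl pvStepB (done, cur)).2]).map
        (fun g => PySem.Str.join j g) := by
  intro rest
  induction rest with
  | nil => intro done cur _; simp
  | cons c cs ih =>
    intro done cur hcur
    simp only [List.foldl_cons]
    by_cases hs : PySem.Str.startswith c "\n        " = true
    · have hA : pvStepA j (done.map (PySem.Str.join j), PySem.Str.join j cur) c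
          = ((done ++ [cur]).map (PySem.Str.join j), PySem.Str.join j [PySem.Str.replace c "\n        " ""]) := by
        unfold pvStepA; rw [if_pos hs, pv_join_one]; simp
      have hB : pvStepB (done, cur) c = (done ++ [cur], [PySem.Str.replace c "\n        " ""]) := by
        unfold pvStepB; rw [if_pos hs]
      rw [hA, hB]
      exact ih (done ++ [cur]) [PySem.Str.replace c "\n        " ""] (by simp)
    · have hA : pvStepA j (done.map (PySem.Str.join j), PySem.Str.join j cur) c
          = (done.map (PySem.Str.join j), PySem.Str.join j (cur ++ [c])) := by
        unfold pvStepA; rw [if_neg hs, pv_join_append j cur c hcur]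
      have hB : pvStepB (done, cur) c = (done, cur ++ [c]) := by
        unfold pvStepB; rw [if_neg hs]
      rw [hA, hB]
      exact ih done (cur ++ [c]) (by simp)

-- Reduce A's indexed loop over c0 :: rest to the index-free step over rest.
theorem pv_A_loop (c0 : String) (rest : List String) (j : String)
    (f : List String × String → Int → List String × String)
    (hf0 : ∀ st, f st 0 = (st.1, PySem.Str.replace (PySem.List.pyGetD (c0 :: rest) 0 "") "\n        " ""))
    (hfpos : ∀ st i, 0 < i → f st i = pvStepA j st (PySem.List.pyGetD (c0 :: rest) i "")) :
    (PySem.List.pyRange 0 (PySem.List.len (c0 :: rest)) 1).foldl f ([], "")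
    = rest.foldl (pvStepA j) ([], PySem.Str.replace c0 "\n        " "") := by
  have hlen : PySem.List.len (c0 :: rest) = ((c0 :: rest).length : Int) := by
    simp [PySem.List.len]
  rw [hlen, PySem.List.pyRange_one_cons (by simp)]
  simp only [List.foldl_cons, hf0]
  have hcongr : (PySem.List.pyRange (0 + 1) ((c0 :: rest).length : Int) 1).foldl f
      ([], PySem.Str.replace (PySem.List.pyGetD (c0 :: rest) 0 "") "\n        " "")
      = (PySem.List.pyRange 1 ((c0 :: rest).length : Int) 1).foldl
          (fun acc i => pvStepA j acc (PySem.List.pyGetD (c0 :: rest) i "")) ([], PySem.Str.replace (PySem.List.pyGetD (c0 :: rest) 0 "") "\n        " "") := by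
    rw [show (0 : Int) + 1 = 1 by norm_num]
    exact PySem.List.foldl_congr_mem _ _ _ _
      (fun acc i hi => hfpos acc i (by
        rcases PySem.List.mem_pyRange_one.mp hi with ⟨h1, _⟩; omega))
  rw [hcongr, PySem.List.foldl_pyRange_pyGetD' (c0 :: rest) "" (pvStepA j) _ (by norm_num)]
  simp [PySem.List.pyGetD_zero_cons]

-- ===== VERDICT (by name: the statement is the Claim_ definition above) =====
theorem correct_caption_spec : Claim_equal_correct_caption := by
  intro captions search_keyword _
  unfold Spec_correct_caption
  cases captions with
  | nil => simp [correct_caption, correct_caption_alt]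
  | cons c0 rest =>
    by_cases hk : search_keyword = []
    · subst hk
      unfold correct_caption correct_caption_alt
      rw [if_neg (by simp), if_pos (by simp)]
      rw [pv_A_loop c0 rest "" _
        (by intro st; simp)
        (by
          intro st i hi
          unfold pvStepA
          by_cases hs : PySem.Str.startswith (PySem.List.pyGetD (c0 :: rest) i "") "\n        " = true
          · rw [if_pos (by rw [hs]; simpa using hi), if_pos hs]
          · rw [if_neg (by rw [Bool.and_eq_true]; exact fun h => hs h.1), if_neg (by simp; omega), if_neg hs]
            simp [String.append_empty])]
      have h := pv_core "" rest [] [PySem.Str.replace c0 "\n        " ""] (by simp)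
      simp only [List.map_nil, pv_join_one] at h
      simpa [pvStepB] using h
    · unfold correct_caption correct_caption_alt
      rw [if_pos (by simp [hk])]
      rw [pv_A_loop c0 rest (PySem.List.pyGetD search_keyword 0 "") _
        (by intro st; simp)
        (by
          intro st i hi
          unfold pvStepA
          by_cases hs : PySem.Str.startswith (PySem.List.pyGetD (c0 :: rest) i "") "\n        " = true
          · rw [if_pos (by rw [hs]; simpa using hi), if_pos hs]
          · rw [if_neg (by rw [Bool.and_eq_true]; exact fun h => hs h.1), if_neg (by simp; omega), if_neg hs])]
      have h := pv_core (PySem.List.pyGetD search_keyword 0 "") rest [] [PySem.Str.replace c0 "\n        " ""] (by simp)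
      simp only [List.map_nil, pv_join_one] at h
      simpa [pvStepB, hk] using h
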